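-- pv_equiv track=rewrite | github.com/bustly-ai/openclaw | skills/seedance-video/scripts/seedance_video.py | _segment_durations
-- ===== SOURCE A (Python) =====
-- import math
--
-- def _segment_durations(target_duration: int, segment_duration: int) -> list[int]:
--     if target_duration <= 0:
--         raise RuntimeError("target_duration must be > 0")
--     if segment_duration <= 0:
--         raise RuntimeError("segment_duration must be > 0")
--
--     segments = int(math.ceil(float(target_duration) / float(segment_duration)))
--     durations: list[int] = []
--     remaining = target_duration
--     for _ in range(segments):
--         current = min(segment_duration, remaining)
--         durations.append(current)
--         remaining -= current
--     return durations
-- ===== SOURCE B (Python) =====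
-- def _segment_durations(target_duration: int, segment_duration: int) -> list[int]:
--     if target_duration <= 0:
--         raise RuntimeError("target_duration must be > 0")
--     if segment_duration <= 0:
--         raise RuntimeError("segment_duration must be > 0")
--     full, rem = divmod(target_duration, segment_duration)
--     return [segment_duration] * full + ([rem] if rem else [])
-- ===== Notes on version B (the rewrite author's own statement) =====
-- stated objective: simpler
-- what changed: Replaced the ceil-count loop that appends min(segment, remaining) while decrementing a running remainder with a closed-form divmod construction: [segment_duration]*full plus the nonzero remainder.
import Mathlib
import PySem

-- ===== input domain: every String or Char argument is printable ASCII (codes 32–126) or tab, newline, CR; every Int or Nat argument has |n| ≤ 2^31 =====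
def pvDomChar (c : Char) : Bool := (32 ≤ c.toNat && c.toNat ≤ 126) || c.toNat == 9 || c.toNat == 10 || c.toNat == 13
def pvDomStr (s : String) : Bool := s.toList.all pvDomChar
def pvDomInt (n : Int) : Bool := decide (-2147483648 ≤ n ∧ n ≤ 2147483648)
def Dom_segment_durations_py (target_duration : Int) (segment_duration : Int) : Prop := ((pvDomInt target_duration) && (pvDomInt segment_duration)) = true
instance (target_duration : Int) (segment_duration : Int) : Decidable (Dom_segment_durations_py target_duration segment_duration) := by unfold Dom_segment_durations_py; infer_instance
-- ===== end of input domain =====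

-- B replaces A's ceil-count/append/decrement loop with a closed-form divmod construction (objective: simpler).
-- Both Pythons raise RuntimeError on target_duration ≤ 0 or segment_duration ≤ 0; those inputs are excluded by Pre_.

-- ===== PORT A =====
-- the for-loop over range(segments): appends min(segment_duration, remaining) and decrements remaining
def segAloop (segment_duration : Int) : Nat → Int → List Int
  | 0, _ => []
  | n + 1, remaining =>
      let current := min segment_duration remaining
      current :: segAloop segment_duration n (remaining - current)

-- int(math.ceil(float(t)/float(s))) ported as exact ceiling division -((-t)//s): exact on Dom
-- (|t|,|s| ≤ 2^31 with s > 0, so the double-precision quotient cannot round across an integer).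
def segment_durations_py (target_duration : Int) (segment_duration : Int) : List Int :=
  if target_duration ≤ 0 then []          -- RuntimeError in Python; outside Pre_
  else if segment_duration ≤ 0 then []    -- RuntimeError in Python; outside Pre_
  else
    let segments : Int := -(PySem.Int.floordiv (-target_duration) segment_duration)
    segAloop segment_duration segments.toNat target_duration

-- ===== PORT B =====
def segment_durations_py_alt (target_duration : Int) (segment_duration : Int) : List Int :=
  if target_duration ≤ 0 then []          -- RuntimeError in Python; outside Pre_
  else if segment_duration ≤ 0 then []    -- RuntimeError in Python; outside Pre_
  else
    let full := PySem.Int.floordiv target_duration segment_duration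
    let rem := PySem.Int.mod target_duration segment_duration
    List.replicate full.toNat segment_duration ++ (if rem ≠ 0 then [rem] else [])

-- ===== PRECONDITION & SPEC =====
-- Pre_ excludes exactly the inputs where both programs raise RuntimeError (non-positive arguments).
def Pre_segment_durations_py (target_duration : Int) (segment_duration : Int) : Prop :=
  0 < target_duration ∧ 0 < segment_duration
instance (target_duration : Int) (segment_duration : Int) : Decidable (Pre_segment_durations_py target_duration segment_duration) := by unfold Pre_segment_durations_py; infer_instance
def pvWitness_segment_durations_py : Int × Int := (10, 3)

def Spec_segment_durations_py (target_duration : Int) (segment_duration : Int) (out : List Int) : Prop := out = segment_durations_py_alt target_duration segment_duration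
instance (target_duration : Int) (segment_duration : Int) (out : List Int) : Decidable (Spec_segment_durations_py target_duration segment_duration out) := by unfold Spec_segment_durations_py; infer_instance

-- ===== CLAIM (what is proved, stated in full; the proofs are below) =====
def Claim_equal_segment_durations_py : Prop := ∀ (target_duration : Int) (segment_duration : Int), Dom_segment_durations_py target_duration segment_duration → Pre_segment_durations_py target_duration segment_duration → Spec_segment_durations_py target_duration segment_duration (segment_durations_py target_duration segment_duration)

-- ===== LEMMAS AND PROOFS =====

-- Core invariant: for 0 < rem and n = ⌈rem / s⌉, the loop yields the divmod-shaped list.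
theorem segAloop_closed (s : Int) (hs : 0 < s) :
    ∀ (n : Nat) (rem : Int), 0 < rem → (n : Int) * s - s < rem → rem ≤ (n : Int) * s →
    segAloop s n rem =
      List.replicate (PySem.Int.floordiv rem s).toNat s ++
        (if PySem.Int.mod rem s ≠ 0 then [PySem.Int.mod rem s] else []) := by
  intro n
  induction n with
  | zero => intro rem hr _ hub; simp at hub; omega
  | succ k ih =>
    intro rem hr hlb hub
    rw [PySem.Int.floordiv_eq_ediv_of_pos hs, PySem.Int.mod_eq_emod_of_pos hs]
    have hdm := Int.emod_add_mul_ediv rem s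
    have hm0 : 0 ≤ rem % s := Int.emod_nonneg rem (by omega)
    have hms : rem % s < s := Int.emod_lt_of_pos rem hs
    by_cases hle : rem ≤ s
    · -- last iteration: min = rem, and k must be 0
      have hk : k = 0 := by
        by_contra h
        have hk1 : (1 : Int) ≤ (k : Int) := by exact_mod_cast Nat.one_le_iff_ne_zero.mpr h
        have hks : s ≤ (k : Int) * s := by nlinarith
        have hel : ((k : Int) + 1) * s - s = (k : Int) * s := by ring
        push_cast at hlb
        linarith
      subst hk
      by_cases hlt : rem < s
      · -- rem < s : quotient 0, remainder rem
        have hq : rem / s = 0 := Int.ediv_eq_zero_of_lt (le_of_lt hr) hlt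
        have hm : rem % s = rem := Int.emod_eq_of_lt (le_of_lt hr) hlt
        simp [segAloop, min_def, hq, hm, hr.ne', not_le.mpr hlt]
      · -- rem = s : quotient 1, remainder 0
        have heq : rem = s := le_antisymm hle (not_lt.mp hlt)
        subst heq
        simp [segAloop, Int.ediv_self hr.ne']
    · -- min = s, recurse on rem - s
      rw [not_le] at hle
      simp only [segAloop, min_def, if_pos (le_of_lt hle)]
      have hq' : (rem - s) / s = rem / s - 1 := by
        have := Int.add_mul_ediv_right rem (-1) hs.ne'
        simpa [sub_eq_add_neg, neg_mul, one_mul] using this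
      have hm' : (rem - s) % s = rem % s := Int.sub_emod_right rem s
      have ihres := ih (rem - s) (by omega) (by push_cast at hlb; linarith)
        (by push_cast at hub; linarith)
      rw [ihres, PySem.Int.floordiv_eq_ediv_of_pos hs, PySem.Int.mod_eq_emod_of_pos hs,
        hq', hm']
      have hq1 : 1 ≤ rem / s := by
        have := Int.le_ediv_iff_mul_le hs (a := 1) (b := rem)
        rw [this]; omega
      have hrepl : (rem / s).toNat = ((rem / s - 1).toNat) + 1 := by omega
      rw [hrepl, List.replicate_succ]
      simp

-- the Python ceiling count satisfies the bracket hypotheses of segAloop_closed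
theorem ceil_brackets (t s : Int) (ht : 0 < t) (hs : 0 < s) :
    ((-(PySem.Int.floordiv (-t) s)).toNat : Int) * s - s < t ∧
      t ≤ ((-(PySem.Int.floordiv (-t) s)).toNat : Int) * s := by
  set c := -(PySem.Int.floordiv (-t) s) with hc
  have hb : -(PySem.Int.floordiv (-t) s) = c := hc.symm
  rw [PySem.Int.neg_floordiv_neg_eq_iff_of_pos hs] at hb
  have hcpos : 0 < c := by nlinarith [hb.1, hb.2]
  have : (c.toNat : Int) = c := Int.toNat_of_nonneg (le_of_lt hcpos)
  rw [this]
  constructor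
  · nlinarith [hb.1]
  · exact hb.2

-- ===== VERDICT (by name: the statement is the Claim_ definition above) =====
theorem segment_durations_py_spec : Claim_equal_segment_durations_py := by
  intro t s _ hpre
  obtain ⟨ht, hs⟩ := hpre
  unfold Spec_segment_durations_py segment_durations_py segment_durations_py_alt
  rw [if_neg (by omega), if_neg (by omega), if_neg (by omega), if_neg (by omega)]
  obtain ⟨h1, h2⟩ := ceil_brackets t s ht hs
  exact segAloop_closed s hs _ t ht h1 h2
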